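-- pv_equiv track=rewrite | github.com/pavlovskhat/CS50x | week2/plates.py | scan_pattern
-- ===== SOURCE A (Python) =====
-- def scan_pattern(string: str) -> bool:
-- 	first_digit = False
-- 	for char in string:
-- 		if char.isdigit():
-- 			if not first_digit and char == "0":
-- 				return False
-- 			else:
-- 				first_digit = True
-- 		elif char.isalpha():
-- 			if first_digit:
-- 				return False
-- 		else:
-- 			return False
-- 	return True
-- ===== SOURCE B (Python) =====
-- def scan_pattern(string: str) -> bool:
--     # phase 1: skip the leading run of letters
--     i = 0
--     while i < len(string) and string[i].isalpha():
--         i += 1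
--     if i == len(string):
--         return True
--     # phase 2: the rest must be digits, not starting with '0'
--     if string[i] == "0":
--         return False
--     for ch in string[i:]:
--         if not ch.isdigit():
--             return False
--     return True
-- ===== Notes on version B (the rewrite author's own statement) =====
-- stated objective: simpler
-- what changed: Replaces the single stateful scan with a first_digit flag by a two-phase scan: skip the leading run of letters, then check the remainder is all digits with no leading zero.
import Mathlib
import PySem

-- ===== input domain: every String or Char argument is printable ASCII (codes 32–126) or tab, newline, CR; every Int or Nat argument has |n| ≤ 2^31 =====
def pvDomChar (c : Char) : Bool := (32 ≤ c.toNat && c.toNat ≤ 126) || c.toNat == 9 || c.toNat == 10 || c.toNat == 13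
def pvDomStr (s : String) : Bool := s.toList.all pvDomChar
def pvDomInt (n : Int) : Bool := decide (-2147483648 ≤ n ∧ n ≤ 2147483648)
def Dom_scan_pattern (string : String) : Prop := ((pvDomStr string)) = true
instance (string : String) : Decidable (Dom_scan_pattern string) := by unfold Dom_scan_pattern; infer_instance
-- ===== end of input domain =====

-- B replaces A's single stateful scan (first_digit flag) by a two-phase scan
-- (skip the leading letters, then check the remainder is all digits not starting with '0'); objective: simpler.


-- ===== PORT A =====
-- the for-loop over the characters with the mutable first_digit flag
def scanLoopA : List Char → Bool → Bool
  | [], _ => true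
  | c :: cs, fd =>
    if PySem.Chars.isdigit c then
      if !fd && c == '0' then false else scanLoopA cs true
    else if PySem.Chars.isalpha c then
      if fd then false else scanLoopA cs fd
    else false

def scan_pattern (string : String) : Bool := scanLoopA string.toList false

-- ===== PORT B =====
-- phase 1: `while i < len(string) and string[i].isalpha(): i += 1`, i.e. drop the leading letters
def dropAlphaB : List Char → List Char
  | [] => []
  | c :: cs => if PySem.Chars.isalpha c then dropAlphaB cs else c :: cs

-- phase 2: `for ch in string[i:]: if not ch.isdigit(): return False`
def allDigitsB : List Char → Bool
  | [] => true
  | c :: cs => if PySem.Chars.isdigit c then allDigitsB cs else false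

def scan_pattern_alt (string : String) : Bool :=
  match dropAlphaB string.toList with
  | [] => true                                  -- i == len(string)
  | c :: cs => if c == '0' then false else allDigitsB (c :: cs)

-- ===== PRECONDITION & SPEC =====
def Spec_scan_pattern (string : String) (out : Bool) : Prop := out = scan_pattern_alt string
instance (string : String) (out : Bool) : Decidable (Spec_scan_pattern string out) := by unfold Spec_scan_pattern; infer_instance

-- ===== CLAIM (what is proved, stated in full; the proofs are below) =====
def Claim_equal_scan_pattern : Prop := ∀ (string : String), Dom_scan_pattern string → Spec_scan_pattern string (scan_pattern string)

-- ===== LEMMAS AND PROOFS =====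
theorem isalpha_eq_false_of_isdigit {c : Char} (h : PySem.Chars.isdigit c = true) :
    PySem.Chars.isalpha c = false := by
  simp [PySem.Chars.isdigit, Char.le_def, UInt32.le_iff_toNat_le] at h
  simp [PySem.Chars.isalpha, PySem.Chars.isupper, PySem.Chars.islower, Char.le_def,
    UInt32.le_iff_toNat_le]
  constructor <;> intro h1 <;> omega

theorem isdigit_zero_char {c : Char} (h : (c == '0') = true) :
    PySem.Chars.isdigit c = true := by
  have : c = '0' := by simpa using h
  subst this; decide

-- with the flag already set, A just checks that the rest is all digits
theorem scanLoopA_true (l : List Char) : scanLoopA l true = allDigitsB l := by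
  induction l with
  | nil => rfl
  | cons c cs ih =>
    by_cases hd : PySem.Chars.isdigit c = true
    · simp [scanLoopA, allDigitsB, hd, ih]
    · simp [scanLoopA, allDigitsB, hd]

theorem scanLoopA_false_eq (l : List Char) :
    scanLoopA l false =
      (match dropAlphaB l with
       | [] => true
       | c :: cs => if c == '0' then false else allDigitsB (c :: cs)) := by
  induction l with
  | nil => rfl
  | cons c cs ih =>
    by_cases ha : PySem.Chars.isalpha c = true
    · have hd : PySem.Chars.isdigit c = false := by
        by_cases h : PySem.Chars.isdigit c = true
        · exact absurd ha (by simp [isalpha_eq_false_of_isdigit h])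
        · simpa using h
      simpa [scanLoopA, dropAlphaB, ha, hd] using ih
    · by_cases hd : PySem.Chars.isdigit c = true
      · by_cases hz : (c == '0') = true
        · simp [scanLoopA, dropAlphaB, ha, hd, hz]
        · simp [scanLoopA, dropAlphaB, allDigitsB, ha, hd, hz, scanLoopA_true]
      · have hz : (c == '0') = false := by
          by_cases h : (c == '0') = true
          · exact absurd (isdigit_zero_char h) (by simpa using hd)
          · simpa using h
        simp [scanLoopA, dropAlphaB, allDigitsB, ha, hd, hz]

-- ===== VERDICT (by name: the statement is the Claim_ definition above) =====
theorem scan_pattern_spec : Claim_equal_scan_pattern := by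
  intro s _
  unfold Spec_scan_pattern scan_pattern scan_pattern_alt
  exact scanLoopA_false_eq s.toList
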